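-- pv_equiv track=rewrite | github.com/kgeographer/edop | scripts/pca_cluster_persist.py | generate_cluster_labels
-- ===== SOURCE A (Python) =====
-- def generate_cluster_labels(conn, site_names, labels, X_pca, pca):
--     """Generate interpretive labels for clusters based on loadings."""
--     # For now, use simple numeric labels
--     # Could be enhanced to analyze centroid positions and dominant loadings
--     cluster_descriptions = {
--         0: None, 1: None, 2: None, 3: None, 4: None
--     }
--
--     # Group sites by cluster
--     clusters = {}
--     for i, label in enumerate(labels):
--         if label not in clusters:
--             clusters[label] = []
--         clusters[label].append(site_names[i])
--
--     return clusters
-- ===== SOURCE B (Python) =====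
-- def generate_cluster_labels(conn, site_names, labels, X_pca, pca):
--     """Generate interpretive labels for clusters based on loadings."""
--     cluster_descriptions = {
--         0: None, 1: None, 2: None, 3: None, 4: None
--     }
--
--     # Partition-peeling: repeatedly extract the whole group of the first
--     # remaining label, then drop those pairs and continue.
--     clusters = {}
--     pairs = list(zip(labels, site_names))
--     while pairs:
--         lab = pairs[0][0]
--         clusters[lab] = [name for l, name in pairs if l == lab]
--         pairs = [(l, name) for l, name in pairs if l != lab]
--     return clusters
-- ===== Notes on version B (the rewrite author's own statement) =====
-- stated objective: alternative
-- what changed: A appends each site name to its label's dict entry in one incremental pass; B zips labels with names and peels off one whole cluster per iteration of a worklist loop (extract all pairs of the first remaining label, remove them, repeat), never testing dict membership.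
import Mathlib
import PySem

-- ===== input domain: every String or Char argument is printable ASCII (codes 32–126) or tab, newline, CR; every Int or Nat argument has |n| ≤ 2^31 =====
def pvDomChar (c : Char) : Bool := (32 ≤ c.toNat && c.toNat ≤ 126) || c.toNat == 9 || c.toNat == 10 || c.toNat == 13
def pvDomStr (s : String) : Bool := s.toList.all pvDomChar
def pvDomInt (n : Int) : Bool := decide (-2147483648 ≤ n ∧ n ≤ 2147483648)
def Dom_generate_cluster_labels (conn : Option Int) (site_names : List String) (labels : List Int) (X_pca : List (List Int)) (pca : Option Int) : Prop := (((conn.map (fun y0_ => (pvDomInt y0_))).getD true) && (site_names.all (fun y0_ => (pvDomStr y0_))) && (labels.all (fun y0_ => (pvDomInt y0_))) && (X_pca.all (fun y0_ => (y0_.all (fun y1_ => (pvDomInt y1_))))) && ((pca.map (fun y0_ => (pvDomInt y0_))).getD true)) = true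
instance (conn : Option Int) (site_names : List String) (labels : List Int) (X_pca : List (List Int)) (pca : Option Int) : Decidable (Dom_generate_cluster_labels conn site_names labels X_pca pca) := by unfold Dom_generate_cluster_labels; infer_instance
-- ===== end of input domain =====

-- ===== PORT A =====
-- B replaces A's single incremental dict-building pass by a worklist loop over the
-- zipped (label, name) pairs that peels off one whole cluster at a time
-- (objective: alternative decomposition; no dict membership tests).
def generate_cluster_labels (conn : Option Int) (site_names : List String) (labels : List Int) (X_pca : List (List Int)) (pca : Option Int) : List (Int × List String) :=
  let _cluster_descriptions : PySem.Dict Int (Option Int) :=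
    PySem.Dict.ofList [(0, none), (1, none), (2, none), (3, none), (4, none)]
  -- for i, label in enumerate(labels): if label not in clusters: clusters[label] = []; clusters[label].append(site_names[i])
  let clusters : PySem.Dict Int (List String) :=
    (PySem.List.enumerate labels).foldl
      (fun clusters p =>
        let clusters := if clusters.contains p.2 then clusters else clusters.insert p.2 []
        clusters.modify p.2 [] (fun l => l ++ [(PySem.List.pyGet? site_names p.1).getD ""]))
      PySem.Dict.empty
  clusters.items

-- ===== PORT B =====
-- while pairs: lab = pairs[0][0]; clusters[lab] = [name for l,name in pairs if l == lab];
--              pairs = [(l,name) for l,name in pairs if l != lab]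
def pvPeel : List (Int × String) → List (Int × List String)
  | [] => []
  | p :: t =>
    (p.1, ((p :: t).filter (fun q => q.1 == p.1)).map Prod.snd) ::
      pvPeel ((p :: t).filter (fun q => q.1 != p.1))
termination_by ps => ps.length
decreasing_by
  simp only [List.filter_cons, bne_self_eq_false]
  exact Nat.lt_succ_of_le (List.length_filter_le _ _)

def generate_cluster_labels_alt (conn : Option Int) (site_names : List String) (labels : List Int) (X_pca : List (List Int)) (pca : Option Int) : List (Int × List String) :=
  let _cluster_descriptions : PySem.Dict Int (Option Int) :=
    PySem.Dict.ofList [(0, none), (1, none), (2, none), (3, none), (4, none)]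
  pvPeel (labels.zip site_names)

-- ===== PRECONDITION & SPEC =====
-- Pre_ excludes exactly the inputs where A raises IndexError (some index of labels
-- has no matching entry in site_names).
def Pre_generate_cluster_labels (conn : Option Int) (site_names : List String) (labels : List Int) (X_pca : List (List Int)) (pca : Option Int) : Prop :=
  labels.length ≤ site_names.length
instance (conn : Option Int) (site_names : List String) (labels : List Int) (X_pca : List (List Int)) (pca : Option Int) : Decidable (Pre_generate_cluster_labels conn site_names labels X_pca pca) := by unfold Pre_generate_cluster_labels; infer_instance

def pvWitness_generate_cluster_labels : Option Int × List String × List Int × List (List Int) × Option Int :=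
  (none, ["a", "b", "c"], [1, 0, 1], [], none)

def Spec_generate_cluster_labels (conn : Option Int) (site_names : List String) (labels : List Int) (X_pca : List (List Int)) (pca : Option Int) (out : List (Int × List String)) : Prop := out = generate_cluster_labels_alt conn site_names labels X_pca pca
instance (conn : Option Int) (site_names : List String) (labels : List Int) (X_pca : List (List Int)) (pca : Option Int) (out : List (Int × List String)) : Decidable (Spec_generate_cluster_labels conn site_names labels X_pca pca out) := by unfold Spec_generate_cluster_labels; infer_instance

-- ===== CLAIM (what is proved, stated in full; the proofs are below) =====
def Claim_equal_generate_cluster_labels : Prop := ∀ (conn : Option Int) (site_names : List String) (labels : List Int) (X_pca : List (List Int)) (pca : Option Int), Dom_generate_cluster_labels conn site_names labels X_pca pca → Pre_generate_cluster_labels conn site_names labels X_pca pca → Spec_generate_cluster_labels conn site_names labels X_pca pca (generate_cluster_labels conn site_names labels X_pca pca)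

-- ===== LEMMAS AND PROOFS =====

-- A's two dict statements (setdefault-style insert of [] followed by an in-place
-- append) have the same effect as a single Dict.modify with default [].
theorem stepA_eq_modify {d : PySem.Dict Int (List String)} (k : Int) (v : String) :
    (let d' := if d.contains k then d else d.insert k ([] : List String)
     d'.modify k [] (fun l => l ++ [v])) = d.modify k [] (fun l => l ++ [v]) := by
  by_cases h : d.contains k = true
  · simp [h]
  · have hc : d.contains k = false := by simpa using h
    simp [PySem.Dict.modify, PySem.Dict.insert_insert_self, PySem.Dict.getD_insert_self,
      PySem.Dict.getD_of_not_contains, hc]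

-- Dedup (first occurrences) commutes with filtering.
theorem ofList_filter (p : Int → Bool) (xs : List Int) :
    PySem.Set.ofList (xs.filter p) = (PySem.Set.ofList xs).filter p := by
  induction xs with
  | nil => rfl
  | cons x xs ih =>
    rw [List.filter_cons, PySem.Set.ofList_cons]
    by_cases hp : p x = true
    · rw [if_pos hp, PySem.Set.ofList_cons, List.filter_cons, if_pos hp, ih]
      simp only [PySem.Set.discard, List.filter_comm]
    · rw [if_neg hp, List.filter_cons, if_neg hp, ih]
      simp only [PySem.Set.discard]
      rw [List.filter_comm]
      symm
      apply List.filter_eq_self.mpr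
      intro y hy
      have hyp : p y = true := (List.mem_filter.mp hy).2
      have : y ≠ x := fun h => hp (h ▸ hyp)
      simpa using this

-- Discarding an element from a dedup is the dedup of the filtered list.
theorem discard_ofList (xs : List Int) (a : Int) :
    PySem.Set.discard (PySem.Set.ofList xs) a = PySem.Set.ofList (xs.filter (fun y => y != a)) := by
  rw [ofList_filter]
  simp only [PySem.Set.discard, bne]

-- Characterisation of the peeling loop: it lists the distinct labels in first-
-- appearance order, each with the names of all its pairs in order.
theorem pvPeel_spec (ps : List (Int × String)) :
    pvPeel ps = (PySem.Set.ofList (ps.map Prod.fst)).map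
      (fun lab => (lab, (ps.filter (fun q => q.1 == lab)).map Prod.snd)) := by
  induction ps using pvPeel.induct with
  | case1 => simp [pvPeel]
  | case2 p t ih =>
    rw [pvPeel, ih]
    have hfilt : (p :: t).filter (fun q => q.1 != p.1) = t.filter (fun q => q.1 != p.1) := by
      simp
    rw [List.map_cons, PySem.Set.ofList_cons, List.map_cons]
    have hkeys : PySem.Set.discard (PySem.Set.ofList (t.map Prod.fst)) p.1
        = PySem.Set.ofList ((((p :: t).filter (fun q => q.1 != p.1)).map Prod.fst)) := by
      rw [hfilt, discard_ofList, List.filter_map]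
      rfl
    rw [← hkeys]
    congr 1
    apply List.map_congr_left
    intro lab hlab
    have hne : lab ≠ p.1 := by
      rcases List.mem_filter.mp hlab with ⟨_, h2⟩
      simpa using h2
    congr 1
    have hplab : (p.1 == lab) = false := by simpa using Ne.symm hne
    have h1 : (p :: t).filter (fun q => q.1 == lab) = t.filter (fun q => q.1 == lab) := by
      simp [hplab]
    rw [h1, hfilt, List.filter_comm]
    congr 1
    apply List.filter_eq_self.mpr
    intro q hq
    have : q.1 = lab := by simpa using (List.mem_filter.mp hq).2
    simp [this, hne]

-- Under Pre_, zip(labels, site_names) is exactly A's enumerate-and-index pairs.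
theorem zip_enum_aux (labels : List Int) :
    ∀ (site : List String) (s : Nat), s + labels.length ≤ site.length →
    labels.zip (site.drop s) = (PySem.List.enumerate labels (s : Int)).map
      (fun q => (q.2, (PySem.List.pyGet? site q.1).getD "")) := by
  induction labels with
  | nil => intro site s _; simp [PySem.List.enumerate_nil]
  | cons a ls ih =>
    intro site s h
    have hs : s < site.length := by simp at h; omega
    rw [List.drop_eq_getElem_cons hs, PySem.List.enumerate_cons, List.map_cons,
      List.zip_cons_cons]
    congr 1
    · rw [PySem.List.pyGet?_natCast, List.getElem?_eq_getElem hs]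
      rfl
    · have : ((s : Int) + 1) = ((s + 1 : Nat) : Int) := by push_cast; ring
      rw [this]
      apply ih site (s + 1)
      simp at h ⊢
      omega

theorem zip_eq_enum (labels : List Int) (site_names : List String)
    (h : labels.length ≤ site_names.length) :
    labels.zip site_names = (PySem.List.enumerate labels).map
      (fun q => (q.2, (PySem.List.pyGet? site_names q.1).getD "")) := by
  have := zip_enum_aux labels site_names 0 (by omega)
  simpa using this

-- A's grouping dict, characterised.
theorem generate_cluster_labels_A_items (site_names : List String) (labels : List Int) :
    ((PySem.List.enumerate labels).foldl
        (fun clusters p =>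
          let clusters := if clusters.contains p.2 then clusters else clusters.insert p.2 []
          clusters.modify p.2 [] (fun l => l ++ [(PySem.List.pyGet? site_names p.1).getD ""]))
        PySem.Dict.empty).items
    = (PySem.Set.ofList labels).map (fun lab =>
        (lab, ((PySem.List.enumerate labels).filter (fun q => q.2 == lab)).map
                (fun q => (PySem.List.pyGet? site_names q.1).getD ""))) := by
  have hstep : (fun (clusters : PySem.Dict Int (List String)) (p : Int × Int) =>
        let clusters := if clusters.contains p.2 then clusters else clusters.insert p.2 []
        clusters.modify p.2 [] (fun l => l ++ [(PySem.List.pyGet? site_names p.1).getD ""]))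
      = (fun (clusters : PySem.Dict Int (List String)) (p : Int × Int) =>
        clusters.modify p.2 [] (fun l => l ++ [(PySem.List.pyGet? site_names p.1).getD ""])) := by
    funext d p
    exact stepA_eq_modify p.2 ((PySem.List.pyGet? site_names p.1).getD "")
  simp only [hstep]
  set g : Int × Int → Int × String :=
    fun q => (q.2, (PySem.List.pyGet? site_names q.1).getD "") with hg
  set ps : List (Int × String) := (PySem.List.enumerate labels).map g with hps
  have hfold : (PySem.List.enumerate labels).foldl
      (fun (d : PySem.Dict Int (List String)) (p : Int × Int) =>
        d.modify p.2 [] (fun l => l ++ [(PySem.List.pyGet? site_names p.1).getD ""]))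
      PySem.Dict.empty
      = ps.foldl (fun d p => d.modify p.1 [] (fun l => l ++ [p.2])) PySem.Dict.empty := by
    rw [hps, List.foldl_map]
  rw [hfold]
  set D := ps.foldl (fun d p => d.modify p.1 [] (fun l => l ++ [p.2])) PySem.Dict.empty with hD
  have hnodup : D.keys.Nodup := by
    rw [hD]
    exact PySem.Dict.nodup_keys_foldl_modify_key ps Prod.fst [] (fun d x l => l ++ [x.2])
      PySem.Dict.empty (by simp)
  have hkeys : D.keys = PySem.Set.ofList labels := by
    rw [hD]
    rw [PySem.Dict.keys_foldl_modify_key ps Prod.fst [] (fun d x l => l ++ [x.2]) PySem.Dict.empty]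
    have : ps.map Prod.fst = labels := by
      rw [hps, List.map_map]
      exact PySem.List.map_snd_enumerate labels 0
    rw [this]
    rfl
  rw [PySem.Dict.items_eq_map_keys D hnodup [], hkeys]
  apply List.map_congr_left
  intro lab _
  have hgetD : D.getD lab [] = (ps.filter (fun p => p.1 == lab)).map (fun p => p.2) := by
    rw [hD, PySem.Dict.getD_foldl_modify_append]
    simp
  rw [hgetD, hps, List.filter_map, List.map_map]
  rfl

-- ===== VERDICT (by name: the statement is the Claim_ definition above) =====
theorem generate_cluster_labels_spec : Claim_equal_generate_cluster_labels := by
  intro conn site_names labels X_pca pca _ hpre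
  unfold Spec_generate_cluster_labels
  simp only [generate_cluster_labels, generate_cluster_labels_alt]
  rw [generate_cluster_labels_A_items site_names labels,
    zip_eq_enum labels site_names hpre, pvPeel_spec]
  have hfst : (((PySem.List.enumerate labels).map
      (fun q => (q.2, (PySem.List.pyGet? site_names q.1).getD ""))).map Prod.fst) = labels := by
    rw [List.map_map]
    exact PySem.List.map_snd_enumerate labels 0
  rw [hfst]
  apply List.map_congr_left
  intro lab _
  rw [List.filter_map, List.map_map]
  rfl
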